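-- pv_equiv track=rewrite | github.com/azagoskin/ytpush | ytpush.py | parse_tw_output
-- ===== SOURCE A (Python) =====
-- from typing import Tuple, Dict
--
-- def parse_tw_output(input_stream) -> Tuple[Dict[str, str], str]:
--     body = ""
--     headers = dict()
--     header = True
--
--     for line in input_stream:
--         if header:
--             if line == "\n":
--                 header = False
--             else:
--                 fields = line.strip().split(": ", 2)
--                 if len(fields) == 2:
--                     headers[fields[0]] = fields[1]
--                 else:
--                     headers[fields[0]] = ""
--         else:
--             body += line
--
--     return headers, body
-- ===== SOURCE B (Python) =====
-- def parse_tw_output(input_stream):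
--     lines = list(input_stream)
--     try:
--         i = lines.index("\n")
--     except ValueError:
--         i = len(lines)
--     headers = {}
--     for line in lines[:i]:
--         fields = line.strip().split(": ", 2)
--         headers[fields[0]] = fields[1] if len(fields) == 2 else ""
--     body = "".join(lines[i + 1:])
--     return headers, body
-- ===== Notes on version B (the rewrite author's own statement) =====
-- stated objective: alternative
-- what changed: Replaced the single-pass boolean state machine over the stream by a split-at-separator decomposition: locate the first "\n" line (or end), parse only the prefix as headers with one conditional-value dict assignment, and join the suffix as the body.
import Mathlib
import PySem

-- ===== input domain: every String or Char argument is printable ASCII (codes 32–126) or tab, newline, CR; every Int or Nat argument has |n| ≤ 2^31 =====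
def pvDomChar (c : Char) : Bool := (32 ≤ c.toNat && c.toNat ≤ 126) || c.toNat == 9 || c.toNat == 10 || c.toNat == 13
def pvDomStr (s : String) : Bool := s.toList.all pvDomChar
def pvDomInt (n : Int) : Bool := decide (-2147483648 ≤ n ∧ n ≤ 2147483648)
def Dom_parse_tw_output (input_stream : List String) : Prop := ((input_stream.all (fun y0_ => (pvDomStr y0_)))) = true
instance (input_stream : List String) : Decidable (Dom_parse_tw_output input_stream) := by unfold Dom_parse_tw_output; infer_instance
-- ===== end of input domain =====

-- B replaces A's one-pass boolean state machine by a split-at-separator decomposition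
-- (find the first "\n" line, parse the prefix as headers, join the suffix as body); alternative, same cost.

-- ===== PORT A =====
-- the loop body of A's for-loop over (headers, body, header)
def pvAStep (st : PySem.Dict String String × String × Bool) (line : String) :
    PySem.Dict String String × String × Bool :=
  let headers := st.1
  let body := st.2.1
  let header := st.2.2
  if header then
    if line == "\n" then (headers, body, false)
    else
      let fields := (PySem.Str.splitMax? (PySem.Str.strip line) ": " 2).getD []
      if fields.length == 2 then
        (headers.insert (PySem.List.pyGetD fields 0 "") (PySem.List.pyGetD fields 1 ""), body, header)
      else
        (headers.insert (PySem.List.pyGetD fields 0 "") "", body, header)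
  else
    (headers, body ++ line, header)

def parse_tw_output (input_stream : List String) : (List (String × String)) × String :=
  let st := input_stream.foldl pvAStep (PySem.Dict.empty, "", true)
  (st.1.items, st.2.1)

-- ===== PORT B =====
-- the loop body of B's header loop over lines[:i]
def pvBStep (d : PySem.Dict String String) (line : String) : PySem.Dict String String :=
  let fields := (PySem.Str.splitMax? (PySem.Str.strip line) ": " 2).getD []
  d.insert (PySem.List.pyGetD fields 0 "")
    (if fields.length == 2 then PySem.List.pyGetD fields 1 "" else "")

def parse_tw_output_alt (input_stream : List String) : (List (String × String)) × String :=
  let lines := input_stream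
  let i := (PySem.List.index? lines "\n").getD lines.length
  let headers := (lines.take i).foldl pvBStep PySem.Dict.empty
  let body := PySem.Str.join "" (lines.drop (i + 1))
  (headers.items, body)

-- ===== PRECONDITION & SPEC =====
def Spec_parse_tw_output (input_stream : List String) (out : (List (String × String)) × String) : Prop := out = parse_tw_output_alt input_stream
instance (input_stream : List String) (out : (List (String × String)) × String) : Decidable (Spec_parse_tw_output input_stream out) := by unfold Spec_parse_tw_output; infer_instance

-- ===== CLAIM (what is proved, stated in full; the proofs are below) =====
def Claim_equal_parse_tw_output : Prop := ∀ (input_stream : List String), Dom_parse_tw_output input_stream → Spec_parse_tw_output input_stream (parse_tw_output input_stream)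

-- ===== LEMMAS AND PROOFS =====

theorem pvJoinEmpty_nil : PySem.Str.join "" ([] : List String) = "" := by
  apply String.toList_inj.mp
  simp [PySem.Str.join, PySem.Chars.join, List.intercalate]

theorem pvJoinEmpty_cons (x : String) (xs : List String) :
    PySem.Str.join "" (x :: xs) = x ++ PySem.Str.join "" xs := by
  apply String.toList_inj.mp
  cases xs <;> simp [PySem.Str.join, PySem.Chars.join, List.intercalate]

-- after the separator, A's loop only appends lines to the body
theorem pvLoopFalse (rest : List String) (d : PySem.Dict String String) (b : String) :
    rest.foldl pvAStep (d, b, false) = (d, b ++ PySem.Str.join "" rest, false) := by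
  induction rest generalizing b with
  | nil => simp [pvJoinEmpty_nil]
  | cons x xs ih =>
      simp only [List.foldl_cons, pvAStep, if_neg Bool.false_ne_true, ih,
        pvJoinEmpty_cons, String.append_assoc]

-- in header mode on a non-"\n" line, A's step is B's step
theorem pvAStep_eq_pvBStep (d : PySem.Dict String String) (b : String) (line : String)
    (h : line ≠ "\n") : pvAStep (d, b, true) line = (pvBStep d line, b, true) := by
  simp only [pvAStep, pvBStep]
  split_ifs with h1 h2 <;> simp_all

-- main invariant: A's loop in header mode = B's decomposition
theorem pvLoopTrue (lines : List String) (d : PySem.Dict String String) (b : String) :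
    lines.foldl pvAStep (d, b, true) =
      ((lines.take ((PySem.List.index? lines "\n").getD lines.length)).foldl pvBStep d,
       b ++ PySem.Str.join "" (lines.drop ((PySem.List.index? lines "\n").getD lines.length + 1)),
       !lines.contains "\n") := by
  induction lines generalizing d b with
  | nil => simp [pvJoinEmpty_nil]
  | cons x xs ih =>
      by_cases hx : x = "\n"
      · subst hx
        rw [PySem.List.index?_cons_self, List.foldl_cons,
          show pvAStep (d, b, true) "\n" = (d, b, false) from by simp [pvAStep],
          pvLoopFalse]
        simp [List.contains_eq_mem]
      · rw [PySem.List.index?_cons_of_ne xs hx, List.foldl_cons,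
          pvAStep_eq_pvBStep d b x hx, ih]
        cases hidx : PySem.List.index? xs "\n" with
        | none =>
            have hnm : "\n" ∉ xs := by
              intro h
              have := (PySem.List.index?_isSome_iff xs "\n").mpr h
              rw [hidx] at this
              exact Bool.false_ne_true this
            have hx' : ¬"\n" = x := fun h => hx h.symm
            simp only [Option.map_none, Option.getD_none, List.length_cons]
            rw [List.take_of_length_le (le_refl _), List.take_of_length_le (by simp),
              List.drop_of_length_le (by simp), List.drop_of_length_le (by simp)]
            simp [List.contains_eq_mem, hnm, hx']
        | some j =>
            have hmem : "\n" ∈ xs := (PySem.List.index?_isSome_iff xs "\n").mp (by rw [hidx]; rfl)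
            simp only [Option.map_some, Option.getD_some, List.take_succ_cons, List.foldl_cons]
            rw [List.drop_succ_cons]
            simp [List.contains_eq_mem, hmem]

-- ===== VERDICT (by name: the statement is the Claim_ definition above) =====
theorem parse_tw_output_spec : Claim_equal_parse_tw_output := by
  intro input_stream _
  unfold Spec_parse_tw_output parse_tw_output parse_tw_output_alt
  rw [pvLoopTrue]
  simp
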